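-- pv_equiv track=rewrite | github.com/10xJSChad/Casual-Leetcoding | CodeWars/Python Solutions/Esolang Interpreters #4 - Boolfuck Interpreter.py | input_to_bits
-- ===== SOURCE A (Python) =====
-- def input_to_bits(input):
--     input_bits = []
--     for x in input:
--         input_bits.append(format(ord(x), 'b'))
--
--     for i, x in enumerate(input_bits):
--         while(len(input_bits[i]) < 8): input_bits[i] = "0" + input_bits[i]
--
--         #It is already in the right order and on its own does not need to be reversed
--         #However, if left as is, it will be reversed into the wrong order at the end of the interpretation
--         input_bits[i] = input_bits[i][::-1]
--     return ''.join(input_bits)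
-- ===== SOURCE B (Python) =====
-- def input_to_bits(input):
--     return ''.join(
--         '1' if (ord(x) >> i) & 1 else '0'
--         for x in input
--         for i in range(max(8, ord(x).bit_length()))
--     )
-- ===== Notes on version B (the rewrite author's own statement) =====
-- stated objective: idiomatic
-- what changed: B emits each character's bits LSB-first directly by arithmetic shifts over range(max(8, bit_length)) in one joined comprehension, instead of A's build-binary-string, pad-while-loop, then slice-reverse passes.
import Mathlib
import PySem

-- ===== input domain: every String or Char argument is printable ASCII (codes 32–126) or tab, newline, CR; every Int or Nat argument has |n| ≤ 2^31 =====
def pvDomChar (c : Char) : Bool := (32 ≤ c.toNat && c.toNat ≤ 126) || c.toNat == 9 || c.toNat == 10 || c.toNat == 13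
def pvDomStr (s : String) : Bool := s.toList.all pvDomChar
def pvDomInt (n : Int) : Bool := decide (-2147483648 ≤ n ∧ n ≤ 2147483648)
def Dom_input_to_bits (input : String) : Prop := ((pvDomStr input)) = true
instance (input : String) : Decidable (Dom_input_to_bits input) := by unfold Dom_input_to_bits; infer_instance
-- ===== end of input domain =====

-- B replaces A's format/pad/reverse string passes by direct LSB-first bit extraction (idiomatic; same cost).

-- ===== PORT A =====
-- format(n, 'b') ported by hand (fuel = n makes the div-2 recursion structural; exact for all n)
def pvBinGo : Nat → Nat → List Char
  | 0, _ => []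
  | _, 0 => []
  | f+1, n => pvBinGo f (n / 2) ++ [if n % 2 == 1 then '1' else '0']

def pvBin (n : Nat) : List Char := if n == 0 then ['0'] else pvBinGo n n

-- the 'while len < 8: prepend "0"' loop (fuel 8 suffices: each step grows the list)
def pvPadGo : Nat → List Char → List Char
  | 0, l => l
  | f+1, l => if l.length < 8 then pvPadGo f ('0' :: l) else l

def input_to_bits (input : String) : String :=
  let input_bits := input.toList.map (fun x => pvBin x.toNat)
  let input_bits := input_bits.map (fun b => (pvPadGo 8 b).reverse)
  String.mk input_bits.flatten

-- ===== PORT B =====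
-- int.bit_length() ported by hand (fuel = n; exact for all n)
def pvBitLenGo : Nat → Nat → Nat
  | 0, _ => 0
  | _, 0 => 0
  | f+1, n => 1 + pvBitLenGo f (n / 2)

def pvBitLen (n : Nat) : Nat := pvBitLenGo n n

def input_to_bits_alt (input : String) : String :=
  String.mk (input.toList.flatMap (fun x =>
    (List.range (max 8 (pvBitLen x.toNat))).map
      (fun i => if (x.toNat >>> i) &&& 1 == 1 then '1' else '0')))

-- ===== PRECONDITION & SPEC =====
def Spec_input_to_bits (input : String) (out : String) : Prop := out = input_to_bits_alt input
instance (input : String) (out : String) : Decidable (Spec_input_to_bits input out) := by unfold Spec_input_to_bits; infer_instance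

-- ===== CLAIM (what is proved, stated in full; the proofs are below) =====
def Claim_equal_input_to_bits : Prop := ∀ (input : String), Dom_input_to_bits input → Spec_input_to_bits input (input_to_bits input)

-- ===== LEMMAS AND PROOFS =====
-- per-character agreement on all codes a Dom character can have
theorem pv_perchar : ∀ n < 127,
    (pvPadGo 8 (pvBin n)).reverse =
      (List.range (max 8 (pvBitLen n))).map
        (fun i => if (n >>> i) &&& 1 == 1 then '1' else '0') := by decide

theorem pv_dom_lt (c : Char) (h : pvDomChar c = true) : c.toNat < 127 := by
  simp [pvDomChar] at h; omega

-- ===== VERDICT (by name: the statement is the Claim_ definition above) =====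
theorem input_to_bits_spec : Claim_equal_input_to_bits := by
  intro input hdom
  unfold Spec_input_to_bits input_to_bits input_to_bits_alt
  simp only [List.map_map, List.flatMap_def]
  congr 1
  congr 1
  apply List.map_congr_left
  intro c hc
  have hd : pvDomChar c = true := by
    have := hdom
    unfold Dom_input_to_bits pvDomStr at this
    exact List.all_eq_true.mp this c hc
  exact pv_perchar c.toNat (pv_dom_lt c hd)
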